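-- pv_equiv track=rewrite | github.com/Miaymiay/GAME2048 | game2048.py | multiplyingValues
-- ===== SOURCE A (Python) =====
-- def multiplyingValues(data):
--     result = [0]
--     # поиск в массиве значений, не равных нулю
--     data = [x for x in data if x != 0]
--     # обход всех элементов массива
--     for element in data:
--         # если значения совпадают, умножим значение на 2
--         if element == result[len(result) - 1]:
--             result[len(result) - 1] *= 2
--             # одну ячейку обнулить
--             result.append(0)
--         else:
--             result.append(element)
--
--     result = [x for x in result if x != 0]
--     return result
-- ===== SOURCE B (Python) =====
-- def multiplyingValues(data):
--     nums = [x for x in data if x != 0]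
--     result = []
--     i = 0
--     while i < len(nums):
--         if i + 1 < len(nums) and nums[i] == nums[i + 1]:
--             result.append(nums[i] * 2)
--             i += 2
--         else:
--             result.append(nums[i])
--             i += 1
--     return result
-- ===== Notes on version B (the rewrite author's own statement) =====
-- stated objective: simpler
-- what changed: Replaces A's sentinel-zero accumulator (start [0], double-and-append-0 on merge, trailing zero filter) with a direct pairwise index sweep over the zero-free list that emits each tile or merged pair once, needing no sentinel and no final filter.
import Mathlib
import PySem

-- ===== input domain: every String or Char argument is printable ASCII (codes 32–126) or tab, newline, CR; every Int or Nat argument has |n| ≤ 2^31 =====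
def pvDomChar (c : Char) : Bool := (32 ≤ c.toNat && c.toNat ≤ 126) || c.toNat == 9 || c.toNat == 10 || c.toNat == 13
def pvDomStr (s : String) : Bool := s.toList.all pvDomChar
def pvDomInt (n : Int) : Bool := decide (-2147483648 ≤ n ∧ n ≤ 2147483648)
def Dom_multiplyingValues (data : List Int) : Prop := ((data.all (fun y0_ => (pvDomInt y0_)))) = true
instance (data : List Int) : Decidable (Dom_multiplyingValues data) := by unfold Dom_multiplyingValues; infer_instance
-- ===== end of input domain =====

-- B replaces A's sentinel-zero accumulator with a pairwise index sweep over the zero-free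
-- list (simpler: no sentinel, no trailing filter); same values proved for all inputs.

-- ===== PORT A =====
-- one loop step of A: result[len(result)-1] is always valid (result starts [0] and only grows),
-- so it is result.getLastD 0; 'result[-1] *= 2; result.append(0)' = dropLast ++ [last*2, 0]
def pvStepA (result : List Int) (element : Int) : List Int :=
  if element = result.getLastD 0 then
    result.dropLast ++ [result.getLastD 0 * 2, 0]
  else
    result ++ [element]

def multiplyingValues (data : List Int) : List Int :=
  let data' := data.filter (fun x => x != 0)
  let result := data'.foldl pvStepA [0]
  result.filter (fun x => x != 0)

-- ===== PORT B =====
-- B's while loop over index i (advance by 2 on a merged pair, by 1 otherwise) as the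
-- corresponding structural recursion on the remaining suffix nums[i:]
def pvSweep : List Int → List Int
  | [] => []
  | [x] => [x]
  | x :: y :: rest =>
    if x = y then x * 2 :: pvSweep rest
    else x :: pvSweep (y :: rest)

def multiplyingValues_alt (data : List Int) : List Int :=
  pvSweep (data.filter (fun x => x != 0))

-- ===== PRECONDITION & SPEC =====
def Spec_multiplyingValues (data : List Int) (out : List Int) : Prop := out = multiplyingValues_alt data
instance (data : List Int) (out : List Int) : Decidable (Spec_multiplyingValues data out) := by unfold Spec_multiplyingValues; infer_instance

-- ===== CLAIM (what is proved, stated in full; the proofs are below) =====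
def Claim_equal_multiplyingValues : Prop := ∀ (data : List Int), Dom_multiplyingValues data → Spec_multiplyingValues data (multiplyingValues data)

-- ===== LEMMAS AND PROOFS =====

-- invariant: with last element t ≠ 0 and only nonzero elements pending, A's remaining
-- fold realises B's pairwise sweep of (t :: nums) after the committed prefix r
theorem pvKey : ∀ (nums : List Int), (∀ x ∈ nums, x ≠ 0) → ∀ (r : List Int) (t : Int), t ≠ 0 →
    (List.foldl pvStepA (r ++ [t]) nums).filter (fun x => x != 0)
      = r.filter (fun x => x != 0) ++ pvSweep (t :: nums)
  | [], _, r, t, ht => by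
      simp [pvSweep, List.filter_append, ht]
  | [y], h, r, t, ht => by
      have hy : y ≠ 0 := h y (by simp)
      by_cases hyt : y = t
      · subst hyt
        simp [pvStepA, pvSweep, List.filter_append, hy]
      · simp [pvStepA, pvSweep, hyt, Ne.symm hyt, hy, ht, List.filter_append]
  | y :: z :: rest, h, r, t, ht => by
      have hy : y ≠ 0 := h y (by simp)
      have hz : z ≠ 0 := h z (by simp)
      have hrest : ∀ x ∈ rest, x ≠ 0 := fun x hx => h x (by simp [hx])
      by_cases hyt : y = t
      · -- merge: state becomes (r ++ [2t]) ++ [0]; next element z opens a fresh run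
        subst hyt
        have step1 : pvStepA (r ++ [y]) y = (r ++ [y * 2, 0]) := by
          simp [pvStepA, List.dropLast_append_of_ne_nil]
        have step2 : pvStepA (r ++ [y * 2, 0]) z = (r ++ [y * 2, 0]) ++ [z] := by
          simp [pvStepA, hz]
        rw [List.foldl_cons, step1, List.foldl_cons, step2,
          pvKey rest hrest (r ++ [y * 2, 0]) z hz]
        simp [pvSweep, List.filter_append, hy]
      · -- no merge: append y, continue with last = y
        have step1 : pvStepA (r ++ [t]) y = (r ++ [t]) ++ [y] := by
          simp [pvStepA, hyt]
        rw [List.foldl_cons, step1, pvKey (z :: rest) (fun x hx => h x (List.mem_cons_of_mem _ hx)) (r ++ [t]) y hy]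
        simp [pvSweep, Ne.symm hyt, List.filter_append, ht]
  termination_by nums => nums.length

theorem pvMain (data : List Int) : multiplyingValues data = multiplyingValues_alt data := by
  unfold multiplyingValues multiplyingValues_alt
  have hnz : ∀ x ∈ data.filter (fun x => x != 0), x ≠ 0 := by
    intro x hx
    have := List.of_mem_filter hx
    simpa using this
  cases hcase : data.filter (fun x => x != 0) with
  | nil => simp [pvSweep]
  | cons a rest =>
      have ha : a ≠ 0 := hnz a (by rw [hcase]; simp)
      have hrest : ∀ x ∈ rest, x ≠ 0 := fun x hx => hnz x (by rw [hcase]; simp [hx])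
      have step1 : pvStepA [0] a = [0] ++ [a] := by
        simp [pvStepA, ha]
      simp only [List.foldl_cons, step1]
      rw [pvKey rest hrest [0] a ha]
      simp

-- ===== VERDICT (by name: the statement is the Claim_ definition above) =====
theorem multiplyingValues_spec : Claim_equal_multiplyingValues := by
  intro data _
  unfold Spec_multiplyingValues
  exact pvMain data
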